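-- pv_equiv track=rewrite | github.com/MissNatcharak/my-project | detect_bot.py | detect_bot
-- ===== SOURCE A (Python) =====
-- def detect_bot(tweets):
--     bot_count = 0
--     time_threshold = 60
--     content_count = {}
--
--     for i in range(1, len(tweets)):
--         tweet_content = tweets[i].lower()
--         if tweet_content in content_count:
--             content_count[tweet_content] += 1
--         else:
--             content_count[tweet_content] = 1
--
--         if content_count[tweet_content] > 2:
--             bot_count += 1
--
--     return bot_count
-- ===== SOURCE B (Python) =====
-- def detect_bot(tweets):
--     # Two phases: build the full frequency table over tweets[1:] (lowercased),
--     # then reduce over the distinct group totals.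
--     content_count = {}
--     for t in tweets[1:]:
--         c = t.lower()
--         content_count[c] = content_count.get(c, 0) + 1
--     return sum(c - 2 for c in content_count.values() if c > 2)
-- ===== Notes on version B (the rewrite author's own statement) =====
-- stated objective: simpler
-- what changed: Replaces A's single interleaved pass (update counter, then threshold-check inline per tweet) by a count pass over tweets[1:] followed by a separate reduce over the distinct group totals: sum(c - 2 for c in counts.values() if c > 2).
import Mathlib
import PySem

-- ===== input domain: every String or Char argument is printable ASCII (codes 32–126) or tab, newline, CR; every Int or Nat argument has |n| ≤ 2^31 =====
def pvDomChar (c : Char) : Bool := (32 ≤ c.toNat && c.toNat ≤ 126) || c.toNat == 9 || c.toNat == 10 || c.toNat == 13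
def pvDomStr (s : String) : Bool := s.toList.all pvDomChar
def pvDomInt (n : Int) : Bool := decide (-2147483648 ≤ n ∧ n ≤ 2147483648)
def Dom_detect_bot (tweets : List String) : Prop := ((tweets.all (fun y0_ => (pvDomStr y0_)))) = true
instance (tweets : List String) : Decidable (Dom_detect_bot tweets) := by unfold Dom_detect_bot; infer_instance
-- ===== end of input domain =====

-- B replaces A's interleaved count-and-threshold single pass by a count pass plus a reduce over distinct totals (objective: simpler).

-- ===== PORT A =====
-- 'time_threshold = 60' is dead code in A and is omitted; tweets[i] is always in range, ported with pyGetD.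
def detect_bot (tweets : List String) : Int :=
  ((PySem.List.pyRange 1 (PySem.List.len tweets) 1).foldl
    (fun (st : Int × PySem.Dict String Int) (i : Int) =>
      let tweet_content := PySem.Str.lower (PySem.List.pyGetD tweets i "")
      let content_count :=
        if st.2.contains tweet_content then
          st.2.insert tweet_content (st.2.getD tweet_content 0 + 1)
        else
          st.2.insert tweet_content 1
      let bot_count := if content_count.getD tweet_content 0 > 2 then st.1 + 1 else st.1
      (bot_count, content_count))
    (0, PySem.Dict.empty)).1

-- ===== PORT B =====
def detect_bot_alt (tweets : List String) : Int :=
  let content_count :=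
    (PySem.List.slice tweets (some 1) none).foldl
      (fun (d : PySem.Dict String Int) t =>
        let c := PySem.Str.lower t
        d.insert c (d.getD c 0 + 1))
      PySem.Dict.empty
  ((content_count.values.filter (fun c => c > 2)).map (fun c => c - 2)).sum

-- ===== PRECONDITION & SPEC =====
def Spec_detect_bot (tweets : List String) (out : Int) : Prop := out = detect_bot_alt tweets
instance (tweets : List String) (out : Int) : Decidable (Spec_detect_bot tweets out) := by unfold Spec_detect_bot; infer_instance

-- ===== CLAIM (what is proved, stated in full; the proofs are below) =====
def Claim_equal_detect_bot : Prop := ∀ (tweets : List String), Dom_detect_bot tweets → Spec_detect_bot tweets (detect_bot tweets)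

-- ===== LEMMAS AND PROOFS =====

-- sum of max(v-2,0) over the items' values
def pvH (its : List (String × Int)) : Int := (its.map (fun p => max (p.2 - 2) 0)).sum

def pvG (d : PySem.Dict String Int) : Int := pvH d.items

-- B's reduce over the values equals the max-form sum
theorem pv_filter_map_sum (l : List Int) :
    ((l.filter (fun c => c > 2)).map (fun c => c - 2)).sum = (l.map (fun v => max (v - 2) 0)).sum := by
  induction l with
  | nil => rfl
  | cons x xs ih =>
    by_cases h : x > 2 <;>
      simp [h, ih] <;> omega

theorem pvH_map_update (x : String) (w : Int) :
    ∀ its : List (String × Int), (its.map (·.1)).Nodup → (x, w) ∈ its →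
    pvH (its.map (fun p => if p.1 == x then (x, w + 1) else p)) = pvH its + (max (w - 1) 0 - max (w - 2) 0) := by
  intro its
  induction its with
  | nil => intro _ h; cases h
  | cons p rest ih =>
    intro hnd hmem
    simp only [List.map_cons, List.nodup_cons, List.mem_map] at hnd
    rw [List.mem_cons] at hmem
    rcases hmem with h | h
    · subst h
      have hrest : rest.map (fun p => if p.1 == x then (x, w + 1) else p) = rest.map id := by
        apply List.map_congr_left
        intro q hq
        have hne : q.1 ≠ x := fun he => hnd.1 ⟨q, hq, he⟩
        simp [hne]
      rw [List.map_id] at hrest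
      simp only [pvH, List.map_cons, hrest, beq_self_eq_true, if_pos, List.sum_cons]
      omega
    · have hne : p.1 ≠ x := by
        intro he
        exact hnd.1 ⟨(x, w), h, by simp [he]⟩
      have hh : (if p.1 == x then (x, w + 1) else p) = p := by simp [hne]
      have hrec := ih hnd.2 h
      simp only [pvH, List.map_cons, hh, List.sum_cons] at *
      omega

theorem pvG_insert_step (d : PySem.Dict String Int) (x : String) (hnd : d.keys.Nodup) :
    pvG (d.insert x (d.getD x 0 + 1)) = pvG d + (if d.getD x 0 + 1 > 2 then 1 else 0) := by
  by_cases hc : d.contains x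
  · have hsome : (d.get? x).isSome = true := by
      rw [← PySem.Dict.contains_eq_isSome_get?]; exact hc
    rcases Option.isSome_iff_exists.mp hsome with ⟨w, hw⟩
    have hgetD : d.getD x 0 = w := PySem.Dict.getD_of_get?_eq_some d 0 hw
    have hmem : (x, w) ∈ d.items := PySem.Dict.mem_items_of_get?_eq_some d hw
    have hitems := PySem.Dict.items_insert_of_contains d (d.getD x 0 + 1) hc
    rw [hgetD] at hitems ⊢
    simp only [pvG, hitems]
    have := pvH_map_update x w d.items (by simpa [PySem.Dict.keys] using hnd) hmem
    rw [this]
    omega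
  · have hcf : d.contains x = false := by simpa using hc
    have h0 : d.getD x 0 = 0 := PySem.Dict.getD_of_not_contains d 0 hcf
    have hitems := PySem.Dict.items_insert_of_not_contains d (d.getD x 0 + 1) hcf
    simp only [pvG, pvH]
    rw [hitems]
    simp [h0]

-- A's branchy dict update is the single insert
theorem pv_step_dict (d : PySem.Dict String Int) (x : String) :
    (if d.contains x then d.insert x (d.getD x 0 + 1) else d.insert x 1) = d.insert x (d.getD x 0 + 1) := by
  by_cases hc : d.contains x
  · simp [hc]
  · have h0 : d.getD x 0 = 0 := PySem.Dict.getD_of_not_contains d 0 (by simpa using hc)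
    simp [hc, h0]

def pvCnt (ts : List String) (d : PySem.Dict String Int) : PySem.Dict String Int :=
  ts.foldl (fun d t => d.insert (PySem.Str.lower t) (d.getD (PySem.Str.lower t) 0 + 1)) d

-- invariant of A's loop (branchless step, lowercasing inline)
theorem pvA_loop (ts : List String) :
    ∀ (bc : Int) (d : PySem.Dict String Int), d.keys.Nodup →
    (ts.foldl
      (fun (st : Int × PySem.Dict String Int) t =>
        (if (st.2.insert (PySem.Str.lower t) (st.2.getD (PySem.Str.lower t) 0 + 1)).getD (PySem.Str.lower t) 0 > 2
           then st.1 + 1 else st.1,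
          st.2.insert (PySem.Str.lower t) (st.2.getD (PySem.Str.lower t) 0 + 1)))
      (bc, d)).1 = bc + pvG (pvCnt ts d) - pvG d := by
  induction ts with
  | nil => intro bc d _; simp [pvCnt]
  | cons t ts ih =>
    intro bc d hnd
    rw [List.foldl_cons]
    have hget : (d.insert (PySem.Str.lower t) (d.getD (PySem.Str.lower t) 0 + 1)).getD (PySem.Str.lower t) 0
        = d.getD (PySem.Str.lower t) 0 + 1 := PySem.Dict.getD_insert_self d _ _ 0
    have hnd' : (d.insert (PySem.Str.lower t) (d.getD (PySem.Str.lower t) 0 + 1)).keys.Nodup :=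
      PySem.Dict.nodup_keys_insert d _ _ hnd
    rw [ih _ _ hnd', pvG_insert_step d (PySem.Str.lower t) hnd]
    have hcnt : pvCnt (t :: ts) d = pvCnt ts (d.insert (PySem.Str.lower t) (d.getD (PySem.Str.lower t) 0 + 1)) := rfl
    rw [hcnt, hget]
    by_cases h : d.getD (PySem.Str.lower t) 0 + 1 > 2 <;> (simp [h]; try ring)

-- ===== VERDICT (by name: the statement is the Claim_ definition above) =====
theorem detect_bot_spec : Claim_equal_detect_bot := by
  intro tweets _
  unfold Spec_detect_bot detect_bot detect_bot_alt
  rw [PySem.List.slice_from_one]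
  rw [PySem.List.foldl_pyRange_pyGetD tweets ""
        (fun (st : Int × PySem.Dict String Int) t =>
          let tweet_content := PySem.Str.lower t
          let content_count :=
            if st.2.contains tweet_content then
              st.2.insert tweet_content (st.2.getD tweet_content 0 + 1)
            else
              st.2.insert tweet_content 1
          let bot_count := if content_count.getD tweet_content 0 > 2 then st.1 + 1 else st.1
          (bot_count, content_count))
        (0, PySem.Dict.empty) (by norm_num)]
  rw [show (1 : Int).toNat = 1 from rfl, List.drop_one]
  rw [show (fun (st : Int × PySem.Dict String Int) t =>
          let tweet_content := PySem.Str.lower t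
          let content_count :=
            if st.2.contains tweet_content then
              st.2.insert tweet_content (st.2.getD tweet_content 0 + 1)
            else
              st.2.insert tweet_content 1
          let bot_count := if content_count.getD tweet_content 0 > 2 then st.1 + 1 else st.1
          (bot_count, content_count))
      = (fun (st : Int × PySem.Dict String Int) t =>
          (if (st.2.insert (PySem.Str.lower t) (st.2.getD (PySem.Str.lower t) 0 + 1)).getD (PySem.Str.lower t) 0 > 2
             then st.1 + 1 else st.1,
            st.2.insert (PySem.Str.lower t) (st.2.getD (PySem.Str.lower t) 0 + 1)))
      from by funext st t; rw [← pv_step_dict st.2 (PySem.Str.lower t)]]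
  rw [pvA_loop tweets.tail 0 PySem.Dict.empty PySem.Dict.nodup_keys_empty]
  rw [pv_filter_map_sum]
  simp only [PySem.Dict.values, pvG, pvH, List.map_map]
  have hc : (tweets.tail.foldl (fun (d : PySem.Dict String Int) t =>
        let c := PySem.Str.lower t
        d.insert c (d.getD c 0 + 1)) PySem.Dict.empty) = pvCnt tweets.tail PySem.Dict.empty := rfl
  rw [hc]
  simp only [Function.comp_def, PySem.Dict.empty]
  simp [pvCnt]
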